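-- pv_equiv track=rewrite | github.com/CppChan/leetcode | medium/mediumCode/DP/***AdjacentBitCount.py | getAdjBCStringCount
-- ===== SOURCE A (Python) =====
-- def getAdjBCStringCount(n, k):
-- 	dp = [[0]*(k+1) for i in range(n+1)]
-- 	for i in range(1,n+1):
-- 		for j in range(k+1):
-- 			if i <= j: dp[i][j]=0
-- 			elif i == 1 and j == 0: dp[i][j]=2
-- 			elif i == 2 and j == 0: dp[i][j]=3
-- 			elif i == 2 and j ==1 : dp[i][j]=1
-- 			elif j == 0:
-- 				dp[i][j]=dp[i-1][j]+dp[i-2][j]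
-- 			else:
-- 				dp[i][j]= dp[i-1][j]+dp[i-1][j-1]+dp[i-2][j]-dp[i-2][j-1]#.....0 + ......11(represent by dp[i-1][j-1]-dp[i-2][j-1]) + ......01
-- 	return dp[n][k]
-- ===== SOURCE B (Python) =====
-- def getAdjBCStringCount(n, k):
--     # DP on (length, pair count, last bit): end0[j] / end1[j] = number of
--     # length-i strings with j adjacent "11" pairs ending in 0 / in 1.
--     if k >= n:  # a length-n string has at most n-1 adjacent pairs (covers n == 0)
--         return 0
--     size = k + 1
--     end0 = [0] * size
--     end1 = [0] * size
--     end0[0] = 1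
--     end1[0] = 1
--     for _ in range(n - 1):
--         new0 = [end0[j] + end1[j] for j in range(size)]
--         new1 = [end0[j] + (end1[j - 1] if j else 0) for j in range(size)]
--         end0, end1 = new0, new1
--     return end0[k] + end1[k]
-- ===== Notes on version B (the rewrite author's own statement) =====
-- stated objective: faster
-- what changed: B replaces A's (n+1)x(k+1) table recurrence (with its inclusion-exclusion correction term) by a last-bit DP: two rolling length-(k+1) rows counting strings ending in 0 and in 1, plus an early 0 return when k >= n.
import Mathlib
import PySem

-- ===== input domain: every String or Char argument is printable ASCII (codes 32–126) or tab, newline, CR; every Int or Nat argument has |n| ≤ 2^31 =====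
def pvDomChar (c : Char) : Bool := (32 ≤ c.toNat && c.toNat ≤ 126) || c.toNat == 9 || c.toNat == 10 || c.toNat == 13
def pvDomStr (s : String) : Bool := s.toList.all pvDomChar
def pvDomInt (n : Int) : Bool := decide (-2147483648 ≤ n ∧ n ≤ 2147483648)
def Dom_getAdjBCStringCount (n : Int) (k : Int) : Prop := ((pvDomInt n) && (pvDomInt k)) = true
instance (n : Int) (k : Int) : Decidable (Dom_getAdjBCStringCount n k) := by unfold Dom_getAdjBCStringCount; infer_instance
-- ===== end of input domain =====

-- B replaces A's (n+1)×(k+1) table recurrence (with its inclusion–exclusion term)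
-- by a last-bit DP over two rolling rows; return values agree on 0 ≤ n, 0 ≤ k
-- (on n < 0 or k < 0 the Python A raises IndexError, excluded by Pre_).
-- List reads/writes use getD/set on Nat indices: exact for the in-range,
-- non-negative indices these programs use on Pre_.

-- ===== PORT A =====
-- dp[i][j]  (read)
def pvGet (dp : List (List Int)) (i j : Nat) : Int := (dp.getD i []).getD j 0
-- dp[i][j] = v  (write)
def pvSet (dp : List (List Int)) (i j : Nat) (v : Int) : List (List Int) :=
  dp.set i ((dp.getD i []).set j v)
-- the right-hand side assigned to dp[i][j] (A's branch chain, in order)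
def pvCell (dp : List (List Int)) (i j : Nat) : Int :=
  if i ≤ j then 0
  else if i = 1 ∧ j = 0 then 2
  else if i = 2 ∧ j = 0 then 3
  else if i = 2 ∧ j = 1 then 1
  else if j = 0 then pvGet dp (i - 1) j + pvGet dp (i - 2) j
  else pvGet dp (i - 1) j + pvGet dp (i - 1) (j - 1) + pvGet dp (i - 2) j - pvGet dp (i - 2) (j - 1)
-- body of A's outer loop: 'for j in range(k+1): dp[i][j] = ...'
def pvStepA (K : Nat) (dp : List (List Int)) (i : Nat) : List (List Int) :=
  (List.range (K + 1)).foldl (fun dp j => pvSet dp i j (pvCell dp i j)) dp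

def getAdjBCStringCount (n : Int) (k : Int) : Int :=
  -- dp = [[0]*(k+1) for i in range(n+1)]
  let dp := List.replicate (n.toNat + 1) (List.replicate (k.toNat + 1) (0 : Int))
  -- for i in range(1, n+1): for j in range(k+1): ...
  let dp := (List.range' 1 n.toNat).foldl (pvStepA k.toNat) dp
  pvGet dp n.toNat k.toNat

-- ===== PORT B =====
-- one iteration of B's loop: extend every string by one bit, split by last bit
def pvStepB (size : Nat) (p : List Int × List Int) : List Int × List Int :=
  let n0 := (List.range size).map (fun j => p.1.getD j 0 + p.2.getD j 0)
  let n1 := (List.range size).map (fun j => p.1.getD j 0 + (if j = 0 then 0 else p.2.getD (j - 1) 0))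
  (n0, n1)

def getAdjBCStringCount_alt (n : Int) (k : Int) : Int :=
  if n ≤ k then 0
  else
    let size := k.toNat + 1
    -- end0 = end1 = [1, 0, 0, …]  (length-1 strings)
    let init := (List.replicate size (0 : Int)).set 0 1
    let p := (List.range (n.toNat - 1)).foldl (fun p _ => pvStepB size p) (init, init)
    p.1.getD k.toNat 0 + p.2.getD k.toNat 0

-- ===== PRECONDITION & SPEC =====
-- Pre_ excludes exactly n < 0 and k < 0, where Python A raises IndexError.
def Pre_getAdjBCStringCount (n : Int) (k : Int) : Prop := 0 ≤ n ∧ 0 ≤ k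
instance (n : Int) (k : Int) : Decidable (Pre_getAdjBCStringCount n k) := by unfold Pre_getAdjBCStringCount; infer_instance
def pvWitness_getAdjBCStringCount : Int × Int := (5, 2)

def Spec_getAdjBCStringCount (n : Int) (k : Int) (out : Int) : Prop := out = getAdjBCStringCount_alt n k
instance (n : Int) (k : Int) (out : Int) : Decidable (Spec_getAdjBCStringCount n k out) := by unfold Spec_getAdjBCStringCount; infer_instance

-- ===== CLAIM (what is proved, stated in full; the proofs are below) =====
def Claim_equal_getAdjBCStringCount : Prop := ∀ (n : Int) (k : Int), Dom_getAdjBCStringCount n k → Pre_getAdjBCStringCount n k → Spec_getAdjBCStringCount n k (getAdjBCStringCount n k)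

-- ===== LEMMAS AND PROOFS =====

-- (end-in-0, end-in-1) counts for strings of length t+1 with j adjacent "11" pairs
def pvF : Nat → Nat → Int × Int
  | 0, j => (if j = 0 then 1 else 0, if j = 0 then 1 else 0)
  | t+1, j => ((pvF t j).1 + (pvF t j).2,
               (pvF t j).1 + (if j = 0 then 0 else (pvF t (j - 1)).2))

-- total count for length i (0 for length 0, matching A's zero row)
def pvS : Nat → Nat → Int
  | 0, _ => 0
  | i+1, j => (pvF i j).1 + (pvF i j).2

theorem pvF_zero_of_lt : ∀ (t j : Nat), t < j → pvF t j = (0, 0) := by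
  intro t
  induction t with
  | zero =>
    intro j h
    have hj : j ≠ 0 := by omega
    simp [pvF, hj]
  | succ t ih =>
    intro j h
    have hj : j ≠ 0 := by omega
    simp [pvF, ih j (by omega), ih (j - 1) (by omega), hj]

theorem pvS_zero_of_le (i j : Nat) (h : i ≤ j) : pvS i j = 0 := by
  cases i with
  | zero => simp [pvS]
  | succ t => simp [pvS, pvF_zero_of_lt t j (by omega)]

theorem pvS_base10 : pvS 1 0 = 2 := by decide
theorem pvS_base20 : pvS 2 0 = 3 := by decide
theorem pvS_base21 : pvS 2 1 = 1 := by decide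

theorem pvS_rec0 (i : Nat) (h : 3 ≤ i) : pvS i 0 = pvS (i - 1) 0 + pvS (i - 2) 0 := by
  obtain ⟨m, rfl⟩ : ∃ m, i = m + 3 := ⟨i - 3, by omega⟩
  show pvS (m + 3) 0 = pvS (m + 2) 0 + pvS (m + 1) 0
  simp [pvS, pvF]

theorem pvS_rec (i j : Nat) (hi : 3 ≤ i) (hj : 1 ≤ j) :
    pvS i j = pvS (i - 1) j + pvS (i - 1) (j - 1) + pvS (i - 2) j - pvS (i - 2) (j - 1) := by
  obtain ⟨m, rfl⟩ : ∃ m, i = m + 3 := ⟨i - 3, by omega⟩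
  obtain ⟨jj, rfl⟩ : ∃ jj, j = jj + 1 := ⟨j - 1, by omega⟩
  show pvS (m + 3) (jj + 1)
      = pvS (m + 2) (jj + 1) + pvS (m + 2) jj + pvS (m + 1) (jj + 1) - pvS (m + 1) jj
  by_cases hjj : jj = 0
  · subst hjj; simp [pvS, pvF]; all_goals ring
  · simp [pvS, pvF, hjj]; all_goals ring

-- generic list lemmas: reading/writing a '(List.range n).map f' array
theorem pvGetD_range_map {α : Type} (f : Nat → α) (d : α) (n i : Nat) :
    ((List.range n).map f).getD i d = if i < n then f i else d := by
  by_cases h : i < n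
  · rw [if_pos h, List.getD_eq_getElem?_getD, List.getElem?_map, List.getElem?_range h]
    rfl
  · rw [if_neg h, List.getD_eq_getElem?_getD]
    rw [List.getElem?_eq_none (by simpa using h)]
    rfl

theorem pvSet_range_map {α : Type} (f : Nat → α) (n i : Nat) (v : α) (hi : i < n) :
    ((List.range n).map f).set i v = (List.range n).map (fun j => if j = i then v else f j) := by
  apply List.ext_getElem?
  intro m
  rw [List.getElem?_set]
  by_cases h : m < n
  · simp [hi, h]
    split_ifs with e1 e2 e2 <;> first | rfl | omega
  · have him : ¬ i = m := by omega
    rw [if_neg him]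
    rw [List.getElem?_eq_none (by simpa using h), List.getElem?_eq_none (by simpa using h)]

-- the table A's fold produces after processing rows 1..N
def pvTab (N K : Nat) : Nat → Nat → Int :=
  fun i j => if 1 ≤ i ∧ i ≤ N ∧ j ≤ K then pvS i j else 0

-- the concrete list holding a table function
def pvMat (M K : Nat) (g : Nat → Nat → Int) : List (List Int) :=
  (List.range M).map (fun i => (List.range (K + 1)).map (fun j => g i j))

theorem pvGet_mat (M K : Nat) (g : Nat → Nat → Int) (i j : Nat) :
    pvGet (pvMat M K g) i j = if i < M ∧ j < K + 1 then g i j else 0 := by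
  unfold pvGet pvMat
  by_cases hi : i < M
  · have hrow : ((List.range M).map (fun i => (List.range (K + 1)).map (fun j => g i j))).getD i []
        = (List.range (K + 1)).map (fun j => g i j) := by
      rw [List.getD_eq_getElem?_getD, List.getElem?_map, List.getElem?_range hi]
      rfl
    rw [hrow, pvGetD_range_map]
    by_cases hj : j < K + 1
    · rw [if_pos hj, if_pos ⟨hi, hj⟩]
    · rw [if_neg hj, if_neg (by tauto)]
  · have hrow : ((List.range M).map (fun i => (List.range (K + 1)).map (fun j => g i j))).getD i []
        = ([] : List Int) := by
      rw [List.getD_eq_getElem?_getD, List.getElem?_eq_none (by simpa using hi)]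
      rfl
    rw [hrow, if_neg (by tauto)]
    rfl

theorem pvSet_mat (M K : Nat) (g : Nat → Nat → Int) (i j : Nat) (v : Int)
    (hi : i < M) (hj : j < K + 1) :
    pvSet (pvMat M K g) i j v
      = pvMat M K (fun i' j' => if i' = i ∧ j' = j then v else g i' j') := by
  unfold pvSet pvMat
  have hrow : ((List.range M).map (fun i => (List.range (K + 1)).map (fun j => g i j))).getD i []
      = (List.range (K + 1)).map (fun j => g i j) := by
    rw [List.getD_eq_getElem?_getD, List.getElem?_map, List.getElem?_range hi]
    rfl
  rw [hrow, pvSet_range_map _ _ _ _ hj, pvSet_range_map _ _ _ _ hi]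
  apply List.map_congr_left
  intro i' _
  beta_reduce
  by_cases hii : i' = i
  · subst hii
    rw [if_pos rfl]
    apply List.map_congr_left
    intro j' _
    beta_reduce
    by_cases hjj : j' = j
    · subst hjj
      rw [if_pos rfl, if_pos ⟨rfl, rfl⟩]
    · rw [if_neg hjj, if_neg (by tauto)]
  · rw [if_neg hii]
    apply List.map_congr_left
    intro j' _
    beta_reduce
    rw [if_neg (by tauto)]

-- the cell A computes for (N+1, j) is the true count, given finished rows N and N-1
theorem pvCell_eq (N K j : Nat) (hj : j ≤ K)
    (dp : List (List Int))
    (hread : ∀ j', pvGet dp N j' = pvTab N K N j' ∧ pvGet dp (N - 1) j' = pvTab N K (N - 1) j') :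
    pvCell dp (N + 1) j = pvS (N + 1) j := by
  unfold pvCell
  by_cases h0 : N + 1 ≤ j
  · rw [if_pos h0, pvS_zero_of_le _ _ h0]
  rw [if_neg h0]
  by_cases h1 : N + 1 = 1 ∧ j = 0
  · rw [if_pos h1]
    obtain ⟨e, rfl⟩ := h1
    have : N = 0 := by omega
    subst this; exact pvS_base10.symm
  rw [if_neg h1]
  by_cases h2 : N + 1 = 2 ∧ j = 0
  · rw [if_pos h2]
    obtain ⟨e, rfl⟩ := h2
    have : N = 1 := by omega
    subst this; exact pvS_base20.symm
  rw [if_neg h2]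
  by_cases h3 : N + 1 = 2 ∧ j = 1
  · rw [if_pos h3]
    obtain ⟨e, rfl⟩ := h3
    have : N = 1 := by omega
    subst this; exact pvS_base21.symm
  rw [if_neg h3]
  -- remaining branches have N + 1 ≥ 3, so rows N and N - 1 are finished rows ≥ 1
  have hN : 2 ≤ N := by
    rcases Nat.lt_or_ge N 2 with h | h
    · interval_cases N
      · exact absurd ⟨rfl, by omega⟩ h1
      · rcases Nat.eq_zero_or_pos j with rfl | hjp
        · exact absurd ⟨rfl, rfl⟩ h2
        · rcases Nat.lt_or_ge j 2 with hj2 | hj2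
          · exact absurd ⟨rfl, by omega⟩ h3
          · omega
    · exact h
  have showTab : ∀ i' j', 1 ≤ i' → i' ≤ N → j' ≤ K → pvTab N K i' j' = pvS i' j' := by
    intro i' j' a b c
    unfold pvTab
    rw [if_pos ⟨a, b, c⟩]
  have eA : pvGet dp (N + 1 - 1) j = pvS N j := by
    have := (hread j).1
    simpa [showTab N j (by omega) le_rfl hj] using this
  have eB : pvGet dp (N + 1 - 2) j = pvS (N - 1) j := by
    have := (hread j).2
    simpa [showTab (N - 1) j (by omega) (by omega) hj] using this
  by_cases hj0 : j = 0
  · subst hj0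
    rw [if_pos rfl, eA, eB]
    have := pvS_rec0 (N + 1) (by omega)
    simpa using this.symm
  · rw [if_neg hj0]
    have eC : pvGet dp (N + 1 - 1) (j - 1) = pvS N (j - 1) := by
      have := (hread (j - 1)).1
      simpa [showTab N (j - 1) (by omega) le_rfl (by omega)] using this
    have eD : pvGet dp (N + 1 - 2) (j - 1) = pvS (N - 1) (j - 1) := by
      have := (hread (j - 1)).2
      simpa [showTab (N - 1) (j - 1) (by omega) (by omega) (by omega)] using this
    rw [eA, eB, eC, eD]
    have := pvS_rec (N + 1) j (by omega) (by omega)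
    simpa using this.symm

theorem pvStepA_inner (M N K : Nat) (hNM : N + 1 < M) : ∀ (m : Nat), m ≤ K + 1 →
    (List.range m).foldl (fun dp j => pvSet dp (N + 1) j (pvCell dp (N + 1) j))
        (pvMat M K (pvTab N K))
    = pvMat M K (fun i j => if i = N + 1 ∧ j < m then pvS i j else pvTab N K i j) := by
  intro m
  induction m with
  | zero =>
    intro _
    unfold pvMat
    simp only [List.range_zero, List.foldl_nil]
    apply List.map_congr_left
    intro i _
    apply List.map_congr_left
    intro j _
    beta_reduce
    rw [if_neg (by omega)]
  | succ m ih =>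
    intro hm
    rw [List.range_succ, List.foldl_append, ih (by omega), List.foldl_cons, List.foldl_nil]
    have hread : ∀ j',
        pvGet (pvMat M K (fun i j => if i = N + 1 ∧ j < m then pvS i j else pvTab N K i j)) N j'
          = pvTab N K N j' ∧
        pvGet (pvMat M K (fun i j => if i = N + 1 ∧ j < m then pvS i j else pvTab N K i j)) (N - 1) j'
          = pvTab N K (N - 1) j' := by
      intro j'
      constructor
      · rw [pvGet_mat]
        by_cases hj' : j' < K + 1
        · rw [if_pos ⟨by omega, hj'⟩, if_neg (by omega)]
        · rw [if_neg (by tauto)]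
          unfold pvTab
          rw [if_neg (by omega)]
      · rw [pvGet_mat]
        by_cases hj' : j' < K + 1
        · rw [if_pos ⟨by omega, hj'⟩, if_neg (by omega)]
        · rw [if_neg (by tauto)]
          unfold pvTab
          rw [if_neg (by omega)]
    have hcell := pvCell_eq N K m (by omega) _ hread
    rw [hcell, pvSet_mat M K _ (N + 1) m _ (by omega) (by omega)]
    unfold pvMat
    apply List.map_congr_left
    intro i _
    apply List.map_congr_left
    intro j _
    beta_reduce
    by_cases hij : i = N + 1 ∧ j = m
    · rw [if_pos hij, if_pos ⟨hij.1, by omega⟩]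
      obtain ⟨rfl, rfl⟩ := hij
      rfl
    · rw [if_neg hij]
      by_cases h' : i = N + 1 ∧ j < m
      · rw [if_pos h', if_pos ⟨h'.1, by omega⟩]
      · rw [if_neg h', if_neg (by rintro ⟨rfl, hb⟩
                                  rcases Nat.lt_succ_iff_lt_or_eq.mp hb with h | h
                                  · exact h' ⟨rfl, h⟩
                                  · exact hij ⟨rfl, h⟩)]

theorem pvStepA_row (M N K : Nat) (hNM : N + 1 < M) :
    pvStepA K (pvMat M K (pvTab N K)) (N + 1) = pvMat M K (pvTab (N + 1) K) := by
  unfold pvStepA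
  rw [pvStepA_inner M N K hNM (K + 1) le_rfl]
  unfold pvMat
  apply List.map_congr_left
  intro i _
  apply List.map_congr_left
  intro j hj
  beta_reduce
  have hjK : j < K + 1 := by simpa using List.mem_range.mp hj
  unfold pvTab
  by_cases hi : i = N + 1
  · subst hi
    rw [if_pos ⟨rfl, hjK⟩, if_pos ⟨by omega, le_rfl, by omega⟩]
  · rw [if_neg (by tauto)]
    split_ifs <;> first | rfl | omega

theorem pvA_outer (M K : Nat) : ∀ (N : Nat), N < M →
    (List.range' 1 N).foldl (pvStepA K) (List.replicate M (List.replicate (K + 1) 0))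
    = pvMat M K (pvTab N K) := by
  intro N
  induction N with
  | zero =>
    intro _
    simp only [List.range', List.foldl_nil]
    unfold pvMat
    rw [show List.replicate M (List.replicate (K + 1) (0:Int))
          = (List.range M).map (fun _ => List.replicate (K + 1) (0:Int)) from by simp]
    apply List.map_congr_left
    intro i _
    rw [show List.replicate (K + 1) (0:Int) = (List.range (K + 1)).map (fun _ => (0:Int)) from by simp]
    apply List.map_congr_left
    intro j _
    beta_reduce
    unfold pvTab
    rw [if_neg (by omega)]
  | succ N ih =>
    intro hNM
    rw [List.range'_concat, List.foldl_append, ih (by omega), List.foldl_cons, List.foldl_nil]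
    have e : 1 + 1 * N = N + 1 := by omega
    rw [e, pvStepA_row M N K hNM]

theorem pvA_eq (n k : Int) :
    getAdjBCStringCount n k = if n.toNat = 0 then 0 else pvS n.toNat k.toNat := by
  show pvGet ((List.range' 1 n.toNat).foldl (pvStepA k.toNat)
      (List.replicate (n.toNat + 1) (List.replicate (k.toNat + 1) 0))) n.toNat k.toNat = _
  rw [pvA_outer (n.toNat + 1) k.toNat n.toNat (by omega), pvGet_mat]
  rw [if_pos ⟨by omega, by omega⟩]
  unfold pvTab
  by_cases h : n.toNat = 0
  · rw [if_pos h, if_neg (by omega)]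
  · rw [if_neg h, if_pos ⟨by omega, le_rfl, le_rfl⟩]

-- B side: the fold state after t iterations lists (pvF t ·).1 / .2
theorem pvB_iter (K : Nat) : ∀ (t : Nat),
    (List.range t).foldl (fun p (_ : Nat) => pvStepB (K + 1) p)
      ((List.replicate (K + 1) (0 : Int)).set 0 1, (List.replicate (K + 1) (0 : Int)).set 0 1)
    = ((List.range (K + 1)).map (fun j => (pvF t j).1),
       (List.range (K + 1)).map (fun j => (pvF t j).2)) := by
  intro t
  induction t with
  | zero =>
    simp only [List.range_zero, List.foldl_nil]
    have base : (List.replicate (K + 1) (0 : Int)).set 0 1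
        = (List.range (K + 1)).map (fun j => if j = 0 then (1:Int) else 0) := by
      rw [show List.replicate (K + 1) (0:Int) = (List.range (K + 1)).map (fun _ => (0:Int)) from by simp]
      rw [pvSet_range_map _ _ _ _ (by omega)]
    rw [base]
    refine Prod.ext ?_ ?_ <;> (apply List.map_congr_left; intro j _; beta_reduce; simp [pvF])
  | succ t ih =>
    rw [List.range_succ, List.foldl_append, ih, List.foldl_cons, List.foldl_nil]
    unfold pvStepB
    refine Prod.ext ?_ ?_ <;> (apply List.map_congr_left; intro j hj; beta_reduce)
    · have hjK : j < K + 1 := by simpa using List.mem_range.mp hj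
      rw [pvGetD_range_map, pvGetD_range_map, if_pos hjK, if_pos hjK]
      simp [pvF]
    · have hjK : j < K + 1 := by simpa using List.mem_range.mp hj
      rw [pvGetD_range_map, if_pos hjK]
      by_cases hj0 : j = 0
      · subst hj0; simp [pvF]
      · rw [if_neg hj0, pvGetD_range_map, if_pos (by omega)]
        simp [pvF, hj0]

theorem pvB_eq (n k : Int) (hk : 0 ≤ k) :
    getAdjBCStringCount_alt n k = if n ≤ k then 0 else pvS n.toNat k.toNat := by
  unfold getAdjBCStringCount_alt
  by_cases h : n ≤ k
  · rw [if_pos h, if_pos h]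
  · rw [if_neg h, if_neg h]
    simp only [pvB_iter k.toNat (n.toNat - 1)]
    rw [pvGetD_range_map, pvGetD_range_map, if_pos (by omega), if_pos (by omega)]
    obtain ⟨m, hm⟩ : ∃ m, n.toNat = m + 1 := ⟨n.toNat - 1, by omega⟩
    rw [hm]
    simp [pvS]

-- ===== VERDICT (by name: the statement is the Claim_ definition above) =====
theorem getAdjBCStringCount_spec : Claim_equal_getAdjBCStringCount := by
  intro n k _ hpre
  unfold Pre_getAdjBCStringCount at hpre
  obtain ⟨hn, hk⟩ := hpre
  unfold Spec_getAdjBCStringCount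
  rw [pvA_eq n k, pvB_eq n k hk]
  by_cases h : n ≤ k
  · rw [if_pos h]
    by_cases h0 : n.toNat = 0
    · rw [if_pos h0]
    · rw [if_neg h0, pvS_zero_of_le _ _ (by omega)]
  · have hkn : k < n := not_le.mp h
    rw [if_neg h, if_neg (by omega : ¬ n.toNat = 0)]
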